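-- pv_equiv track=rewrite | github.com/syncerpn/leetcode | 3623_count_number_of_trapezoids_i.py | countTrapezoids
-- ===== SOURCE A (Python) =====
-- from typing import List
--
-- def countTrapezoids(points: List[List[int]]) -> int:
--     MOD = 10 ** 9 + 7
--     d = {}
--     for x, y in points:
--         if y not in d:
--             d[y] = 0
--         d[y] += 1
--
--     s, ans = 0, 0
--     for y in d:
--         d[y] = d[y] * (d[y] - 1) // 2
--         ans = (ans + s * d[y]) % MOD
--         s += d[y]
--
--     return ans
-- ===== SOURCE B (Python) =====
-- def countTrapezoids(points):
--     MOD = 10 ** 9 + 7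
--     cnt = {}
--     for p in points:
--         x, y = p
--         cnt[y] = cnt.get(y, 0) + 1
--     S = 0
--     Q = 0
--     for k in cnt.values():
--         c = k * (k - 1) // 2
--         S += c
--         Q += c * c
--     return ((S * S - Q) // 2) % MOD
-- ===== Notes on version B (the rewrite author's own statement) =====
-- stated objective: simpler
-- what changed: Replaces the running prefix-sum cross-product with two exact aggregates S=sum c_i and Q=sum c_i^2 and the closed form sum_{i<j} c_i c_j = (S^2-Q)/2, applying the modulus once at the end.
import Mathlib
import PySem

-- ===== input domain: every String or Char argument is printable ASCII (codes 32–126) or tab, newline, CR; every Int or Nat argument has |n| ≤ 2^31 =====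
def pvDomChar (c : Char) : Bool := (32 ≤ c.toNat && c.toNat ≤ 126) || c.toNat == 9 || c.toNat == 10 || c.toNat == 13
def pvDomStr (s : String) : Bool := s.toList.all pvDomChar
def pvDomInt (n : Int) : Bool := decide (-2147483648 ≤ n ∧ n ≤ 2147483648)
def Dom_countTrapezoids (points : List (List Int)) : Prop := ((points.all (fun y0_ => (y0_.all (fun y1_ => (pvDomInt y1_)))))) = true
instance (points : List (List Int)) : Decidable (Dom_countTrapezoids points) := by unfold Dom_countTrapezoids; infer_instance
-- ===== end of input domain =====

-- B replaces A's running prefix-sum cross-product (modded each step) with two exact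
-- aggregates S = Σ c_i, Q = Σ c_i², returning ((S² − Q) // 2) % MOD (objective: simpler).

-- ===== PORT A =====
-- for x, y in points: if y not in d: d[y] = 0; d[y] += 1
def ctStepA (d : PySem.Dict Int Int) (p : List Int) : PySem.Dict Int Int :=
  let y := (PySem.List.pyGet? p 1).getD 0
  let d1 := if d.contains y then d else d.insert y 0
  d1.insert y (d1.getD y 0 + 1)

-- for y in d: d[y] = d[y]*(d[y]-1)//2; ans = (ans + s*d[y]) % MOD; s += d[y]
def ctStepA2 (st : PySem.Dict Int Int × Int × Int) (y : Int) :
    PySem.Dict Int Int × Int × Int :=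
  let c := PySem.Int.floordiv (st.1.getD y 0 * (st.1.getD y 0 - 1)) 2
  (st.1.insert y c, st.2.1 + c, PySem.Int.mod (st.2.2 + st.2.1 * c) 1000000007)

def countTrapezoids (points : List (List Int)) : Int :=
  let d := points.foldl ctStepA PySem.Dict.empty
  (d.keys.foldl ctStepA2 (d, 0, 0)).2.2

-- ===== PORT B =====
def ctKey (p : List Int) : Int := (PySem.List.pyGet? p 1).getD 0

def ctStepB (d : PySem.Dict Int Int) (p : List Int) : PySem.Dict Int Int :=
  d.insert (ctKey p) (d.getD (ctKey p) 0 + 1)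

def ctStepB2 (sq : Int × Int) (k : Int) : Int × Int :=
  let c := PySem.Int.floordiv (k * (k - 1)) 2
  (sq.1 + c, sq.2 + c * c)

def countTrapezoids_alt (points : List (List Int)) : Int :=
  let cnt := points.foldl ctStepB PySem.Dict.empty
  let sq := cnt.values.foldl ctStepB2 (0, 0)
  PySem.Int.mod (PySem.Int.floordiv (sq.1 * sq.1 - sq.2) 2) 1000000007

-- ===== PRECONDITION & SPEC =====
-- Pre_ excludes exactly the inputs where some point has length ≠ 2, on which
-- Python's tuple unpacking 'for x, y in points' raises ValueError.
def Pre_countTrapezoids (points : List (List Int)) : Prop :=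
  ∀ p ∈ points, p.length = 2
instance (points : List (List Int)) : Decidable (Pre_countTrapezoids points) := by
  unfold Pre_countTrapezoids; infer_instance

def pvWitness_countTrapezoids : List (List Int) :=
  [[0, 1], [2, 1], [0, 2], [3, 2], [5, 3], [6, 3]]

def Spec_countTrapezoids (points : List (List Int)) (out : Int) : Prop :=
  out = countTrapezoids_alt points
instance (points : List (List Int)) (out : Int) : Decidable (Spec_countTrapezoids points out) := by
  unfold Spec_countTrapezoids; infer_instance

-- ===== CLAIM =====
def Claim_equal_countTrapezoids : Prop :=
  ∀ (points : List (List Int)), Dom_countTrapezoids points →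
    Pre_countTrapezoids points → Spec_countTrapezoids points (countTrapezoids points)

-- ===== LEMMAS AND PROOFS =====

-- the two counting passes build the same dict
theorem ctStepA_eq (d : PySem.Dict Int Int) (p : List Int) : ctStepA d p = ctStepB d p := by
  unfold ctStepA ctStepB ctKey
  by_cases h : d.contains ((PySem.List.pyGet? p 1).getD 0) = true
  · simp [h]
  · have hc : d.contains ((PySem.List.pyGet? p 1).getD 0) = false := by simpa using h
    simp only [hc, Bool.false_eq_true, if_false]
    rw [PySem.Dict.insert_insert_self, PySem.Dict.getD_insert_self]
    rw [PySem.Dict.getD_of_not_contains]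
    exact hc

theorem fold_ctStepA_eq (l : List (List Int)) (d : PySem.Dict Int Int) :
    l.foldl ctStepA d = l.foldl ctStepB d := by
  induction l generalizing d with
  | nil => rfl
  | cons p t ih => simp [List.foldl_cons, ctStepA_eq, ih]

-- pure (dict-free) versions of the two second loops
def ctC (k : Int) : Int := PySem.Int.floordiv (k * (k - 1)) 2

def ctPure (st : Int × Int) (c : Int) : Int × Int :=
  (st.1 + c, PySem.Int.mod (st.2 + st.1 * c) 1000000007)

-- the pairwise cross-product sum_{i<j} c_i c_j
def pairT : List Int → Int
  | [] => 0
  | c :: cs => c * cs.sum + pairT cs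

theorem mod_eq_emod (x : Int) : PySem.Int.mod x 1000000007 = x % 1000000007 :=
  PySem.Int.mod_eq_emod_of_pos (by norm_num)

-- A's second loop ignores its dict mutation: each key is read before it is written
theorem loopA_pure (l : List Int) (g : Int → Int) :
    ∀ (d : PySem.Dict Int Int) (s a : Int), l.Nodup →
    (∀ y ∈ l, d.getD y 0 = g y) →
    (l.foldl ctStepA2 (d, s, a)).2 = (l.map (fun y => ctC (g y))).foldl ctPure (s, a) := by
  induction l with
  | nil => intro d s a _ _; rfl
  | cons y t ih =>
    intro d s a hnd hg
    simp only [List.foldl_cons, List.map_cons]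
    have hy : d.getD y 0 = g y := hg y (by simp)
    have hnd' := List.nodup_cons.mp hnd
    rw [show ctStepA2 (d, s, a) y =
        (d.insert y (ctC (g y)), s + ctC (g y),
          PySem.Int.mod (a + s * ctC (g y)) 1000000007) by
      simp [ctStepA2, ctC, hy]]
    rw [ih _ _ _ hnd'.2 ?_]
    · rfl
    · intro y' hy'
      rw [PySem.Dict.getD_insert_of_ne]
      · exact hg y' (List.mem_cons_of_mem _ hy')
      · exact fun h => hnd'.1 (h ▸ hy')

-- A's pure loop computes (a + s*sum cs + pairT cs) mod M, given a already reduced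
theorem ctPure_spec (cs : List Int) : ∀ s a,
    cs.foldl ctPure (s, a % 1000000007) =
      (s + cs.sum, (a + s * cs.sum + pairT cs) % 1000000007) := by
  induction cs with
  | nil => intro s a; simp [pairT]
  | cons c t ih =>
    intro s a
    simp only [List.foldl_cons, ctPure, mod_eq_emod]
    have h1 : (a % 1000000007 + s * c) % 1000000007 = (a + s * c) % 1000000007 := by
      omega
    rw [h1, ih (s + c) (a + s * c)]
    simp only [List.sum_cons, pairT, Prod.mk.injEq]
    refine ⟨by ring, ?_⟩
    have h2 : a + s * c + (s + c) * t.sum + pairT t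
        = a + s * (c + t.sum) + (c * t.sum + pairT t) := by ring
    rw [h2]

-- B's loop accumulates (sum cs, sum cs^2)
theorem ctStepB2_spec (cs : List Int) : ∀ S Q,
    cs.foldl ctStepB2 (S, Q)
      = (S + (cs.map ctC).sum, Q + ((cs.map ctC).map (fun c => c * c)).sum) := by
  induction cs with
  | nil => intro S Q; simp
  | cons c t ih =>
    intro S Q
    simp only [List.foldl_cons, List.map_cons, List.sum_cons, ctStepB2, ctC]
    rw [ih]
    simp only [Prod.mk.injEq]
    exact ⟨by ring, by ring⟩

-- the algebraic identity: S^2 - Q = 2 * pairT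
theorem sq_sub_sumsq (cs : List Int) :
    cs.sum * cs.sum - (cs.map (fun c => c * c)).sum = 2 * pairT cs := by
  induction cs with
  | nil => simp [pairT]
  | cons c t ih =>
    simp only [List.sum_cons, List.map_cons, pairT]
    nlinarith [ih]

theorem fdiv_two_mul (T : Int) : PySem.Int.floordiv (2 * T) 2 = T := by
  rw [PySem.Int.floordiv_eq_ediv_of_pos (by norm_num)]
  omega

-- ===== VERDICT =====
theorem countTrapezoids_spec : Claim_equal_countTrapezoids := by
  intro points _ _
  unfold Spec_countTrapezoids
  have hA : countTrapezoids points =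
      ((points.foldl ctStepB PySem.Dict.empty).keys.foldl ctStepA2
        (points.foldl ctStepB PySem.Dict.empty, 0, 0)).2.2 := by
    unfold countTrapezoids
    rw [fold_ctStepA_eq]
  rw [hA]
  set d := points.foldl ctStepB PySem.Dict.empty with hd
  have hnd : d.keys.Nodup :=
    PySem.Dict.nodup_keys_foldl_insert_key points ctKey
      (fun d p => d.getD (ctKey p) 0 + 1) PySem.Dict.empty PySem.Dict.nodup_keys_empty
  have hB : countTrapezoids_alt points =
      PySem.Int.mod (PySem.Int.floordiv
        ((d.values.foldl ctStepB2 (0, 0)).1 * (d.values.foldl ctStepB2 (0, 0)).1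
          - (d.values.foldl ctStepB2 (0, 0)).2) 2) 1000000007 := rfl
  rw [hB, PySem.Dict.values_eq_map_keys d hnd 0]
  rw [loopA_pure d.keys (fun y => d.getD y 0) d 0 0 hnd (fun _ _ => rfl)]
  set cs := d.keys.map (fun y => ctC (d.getD y 0)) with hcs
  have h1 : (d.keys.map (fun y => d.getD y 0)).foldl ctStepB2 (0, 0)
      = ((0 : Int) + cs.sum, (0 : Int) + (cs.map (fun c => c * c)).sum) := by
    rw [ctStepB2_spec]
    simp [hcs, List.map_map, Function.comp_def]
  have h2 := ctPure_spec cs 0 0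
  norm_num at h2
  simp only [h2, h1, zero_add]
  rw [sq_sub_sumsq cs, fdiv_two_mul, mod_eq_emod]
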